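-- pv_equiv track=rewrite | github.com/CaioJusto/consulta-juridica-unificada | datajud_app/credit_analysis.py | _map_first_row
-- ===== SOURCE A (Python) =====
-- from typing import Any
--
-- def _map_first_row(rows: list[dict[str, Any]]) -> dict[str, dict[str, Any]]:
--     mapped: dict[str, dict[str, Any]] = {}
--     for row in rows:
--         process_number = str(row.get("numero_processo") or "").strip()
--         if not process_number or process_number in mapped:
--             continue
--         mapped[process_number] = row
--     return mapped
-- ===== SOURCE B (Python) =====
-- from typing import Any
--
-- def _map_first_row(rows: list[dict[str, Any]]) -> dict[str, dict[str, Any]]: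
--     groups: dict[str, list[dict[str, Any]]] = {}
--     for row in rows:
--         process_number = str(row.get("numero_processo") or "").strip()
--         if not process_number:
--             continue
--         groups.setdefault(process_number, []).append(row)
--     return {pn: group[0] for pn, group in groups.items()}
-- ===== Notes on version B (the rewrite author's own statement) =====
-- stated objective: alternative
-- what changed: B replaces A's keep-first-insert single dict with a two-phase decomposition: it groups all rows by normalized process number into lists, then builds the result by taking each group's first row.
import Mathlib
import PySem

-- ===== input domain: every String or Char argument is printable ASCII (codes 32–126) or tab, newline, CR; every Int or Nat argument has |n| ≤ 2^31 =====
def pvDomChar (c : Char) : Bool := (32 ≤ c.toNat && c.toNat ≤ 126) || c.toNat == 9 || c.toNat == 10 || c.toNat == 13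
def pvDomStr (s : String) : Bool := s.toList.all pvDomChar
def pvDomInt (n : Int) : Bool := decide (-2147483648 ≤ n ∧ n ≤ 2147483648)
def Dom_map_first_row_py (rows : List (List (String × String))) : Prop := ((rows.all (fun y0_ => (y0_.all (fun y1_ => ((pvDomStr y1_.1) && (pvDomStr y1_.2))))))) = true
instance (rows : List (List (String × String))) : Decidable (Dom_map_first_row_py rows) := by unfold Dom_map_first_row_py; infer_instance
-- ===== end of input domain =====

-- projection taking a group entry (key, rows) to (key, first row)
def pvProj (p : String × List (List (String × String))) : String × List (String × String) :=
  (p.1, p.2.headD [])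

-- B groups rows by normalized process number in one pass and then keeps each group's first row;
-- same result as A's keep-first insertion, by a different decomposition (objective: alternative).

-- ===== PORT A =====
-- process_number = str(row.get("numero_processo") or "").strip()
-- ('x or ""' maps None and "" to ""; str() of a str is the identity, so getD "" then strip is exact)
def pvProcessNumber (row : List (String × String)) : String :=
  PySem.Str.strip (((PySem.Dict.mk row).get? "numero_processo").getD "")

def map_first_row_py (rows : List (List (String × String))) : List (String × List (String × String)) :=
  (rows.foldl
    (fun (mapped : PySem.Dict String (List (String × String))) row =>
      let process_number := pvProcessNumber row
      if process_number = "" ∨ mapped.contains process_number then mapped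
      else mapped.insert process_number row)
    PySem.Dict.empty).items

-- ===== PORT B =====
def map_first_row_py_alt (rows : List (List (String × String))) : List (String × List (String × String)) :=
  let groups : PySem.Dict String (List (List (String × String))) :=
    rows.foldl
      (fun g row =>
        let process_number := pvProcessNumber row
        if process_number = "" then g
        else g.modify process_number [] (· ++ [row]))
      PySem.Dict.empty
  -- group[0]: every group is nonempty by construction, so headD [] is exact here
  groups.items.map pvProj

-- ===== PRECONDITION & SPEC =====
def Spec_map_first_row_py (rows : List (List (String × String))) (out : List (String × List (String × String))) : Prop := out = map_first_row_py_alt rows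
instance (rows : List (List (String × String))) (out : List (String × List (String × String))) : Decidable (Spec_map_first_row_py rows out) := by unfold Spec_map_first_row_py; infer_instance

-- ===== CLAIM (what is proved, stated in full; the proofs are below) =====
def Claim_equal_map_first_row_py : Prop := ∀ (rows : List (List (String × String))), Dom_map_first_row_py rows → Spec_map_first_row_py rows (map_first_row_py rows)

-- ===== LEMMAS AND PROOFS =====

theorem pvInvariant (rows : List (List (String × String)))
    (g : PySem.Dict String (List (List (String × String))))
    (hnd : (PySem.Dict.keys g).Nodup)
    (hne : ∀ p ∈ g.items, p.2 ≠ []) :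
    (rows.foldl
      (fun (mapped : PySem.Dict String (List (String × String))) row =>
        let process_number := pvProcessNumber row
        if process_number = "" ∨ mapped.contains process_number then mapped
        else mapped.insert process_number row)
      (PySem.Dict.mk (g.items.map pvProj))).items
    = (rows.foldl
        (fun g' row =>
          let process_number := pvProcessNumber row
          if process_number = "" then g'
          else g'.modify process_number [] (· ++ [row]))
        g).items.map pvProj := by
  induction rows generalizing g with
  | nil => simp
  | cons row rest ih =>
    simp only [List.foldl_cons]
    set pn := pvProcessNumber row with hpn
    by_cases h0 : pn = ""
    · simpa [h0] using ih g hnd hne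
    · have hcont : (PySem.Dict.mk (g.items.map pvProj)).contains pn = g.contains pn := by
        simp [PySem.Dict.contains, List.any_map, Function.comp_def, pvProj]
      by_cases hc : g.contains pn = true
      · -- key already present: A skips, B appends to the group; projection unchanged
        have hitems : (g.modify pn [] (· ++ [row])).items.map pvProj = g.items.map pvProj := by
          rw [PySem.Dict.modify, PySem.Dict.items_insert_of_contains g _ hc, List.map_map]
          refine List.map_congr_left (fun p hp => ?_)
          obtain ⟨k, v⟩ := p
          by_cases hk : k = pn
          · have hget : g.get? k = some v := PySem.Dict.get?_of_mem_items g hp hnd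
            have hgd : g.getD pn [] = v := by rw [← hk]; simp [PySem.Dict.getD, hget]
            have hv : v ≠ [] := hne (k, v) hp
            cases v with
            | nil => exact absurd rfl hv
            | cons a l => simp [Function.comp, hk, hgd, pvProj]
          · simp [Function.comp, hk]
        have hkeys : (PySem.Dict.keys (g.modify pn [] (· ++ [row]))) = PySem.Dict.keys g := by
          rw [PySem.Dict.modify]
          simp only [PySem.Dict.keys, PySem.Dict.items_insert_of_contains g _ hc, List.map_map]
          refine List.map_congr_left (fun p hp => ?_)
          by_cases hk : p.1 = pn <;> simp [Function.comp, hk]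
        have hne' : ∀ p ∈ (g.modify pn [] (· ++ [row])).items, p.2 ≠ [] := by
          rw [PySem.Dict.modify, PySem.Dict.items_insert_of_contains g _ hc]
          intro p hp
          obtain ⟨q, hq, rfl⟩ := List.mem_map.mp hp
          by_cases hk : q.1 = pn <;> simp [hk]
          exact hne q hq
        have := ih (g.modify pn [] (· ++ [row])) (hkeys ▸ hnd) hne'
        rw [hitems] at this
        simpa [h0, hcont, hc] using this
      · -- new key: A appends (pn, row), B starts the group [row]
        have hcf : g.contains pn = false := by simpa using hc
        have hitems : (g.modify pn [] (· ++ [row])).items = g.items ++ [(pn, [row])] := by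
          rw [PySem.Dict.modify, PySem.Dict.items_insert_of_not_contains g _ hcf,
            PySem.Dict.getD_of_not_contains g _ hcf]
          simp
        have hAins : (PySem.Dict.mk (g.items.map pvProj)).insert pn row
            = PySem.Dict.mk ((g.items ++ [(pn, [row])]).map pvProj) := by
          rw [PySem.Dict.insert]
          simp [hcont, hcf, pvProj]
        have hkeys : (PySem.Dict.keys (g.modify pn [] (· ++ [row]))) = PySem.Dict.keys g ++ [pn] := by
          simp [PySem.Dict.keys, hitems]
        have hnd' : (PySem.Dict.keys (g.modify pn [] (· ++ [row]))).Nodup := by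
          rw [hkeys]
          refine List.nodup_append.mpr ⟨hnd, List.nodup_singleton _, ?_⟩
          intro k hk b hb
          have hb' : b = pn := by simpa using hb
          intro hkb
          have hk' : pn ∈ PySem.Dict.keys g := by rw [← hb', ← hkb]; exact hk
          obtain ⟨v, hp⟩ : ∃ v, (pn, v) ∈ g.items := by simpa [PySem.Dict.keys] using hk'
          have : g.contains pn = true := by
            unfold PySem.Dict.contains
            exact List.any_eq_true.mpr ⟨(pn, v), hp, by simp⟩
          simp [this] at hcf
        have hne' : ∀ p ∈ (g.modify pn [] (· ++ [row])).items, p.2 ≠ [] := by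
          rw [hitems]
          intro p hp
          rcases List.mem_append.mp hp with h | h
          · exact hne p h
          · simp at h; subst h; simp
        have := ih (g.modify pn [] (· ++ [row])) hnd' hne'
        rw [hitems] at this
        simpa [h0, hcont, hcf, hAins, pvProj] using this

-- ===== VERDICT (by name: the statement is the Claim_ definition above) =====
theorem map_first_row_py_spec : Claim_equal_map_first_row_py := by
  intro rows _
  unfold Spec_map_first_row_py map_first_row_py map_first_row_py_alt
  have h := pvInvariant rows PySem.Dict.empty (by simp [PySem.Dict.keys, PySem.Dict.empty]) (by simp [PySem.Dict.empty])
  simpa [PySem.Dict.empty, pvProj] using h
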